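-- pv_equiv track=rewrite | github.com/soji-omiwade/algorithms | before_rubrik/square_count.py | i_count_them
-- ===== SOURCE A (Python) =====
-- def i_count_them(a, b):
--     count = 0
--     while  True:
--         count += a // b
--         a,b = b,a % b
--         if b == 0:
--             break
--     return count
-- ===== SOURCE B (Python) =====
-- def i_count_them(a, b):
--     # recursive decomposition: quotient-sum recurrence on (b, a % b)
--     q, r = a // b, a % b
--     if r == 0:
--         return q
--     return q + i_count_them(b, r)
-- ===== Notes on version B (the rewrite author's own statement) =====
-- stated objective: alternative
-- what changed: Replaced the infinite while-loop with a running accumulator by direct self-recursion on the remainder pair (b, a % b), returning the quotient-sum recurrence without any mutable state.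
import Mathlib
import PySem

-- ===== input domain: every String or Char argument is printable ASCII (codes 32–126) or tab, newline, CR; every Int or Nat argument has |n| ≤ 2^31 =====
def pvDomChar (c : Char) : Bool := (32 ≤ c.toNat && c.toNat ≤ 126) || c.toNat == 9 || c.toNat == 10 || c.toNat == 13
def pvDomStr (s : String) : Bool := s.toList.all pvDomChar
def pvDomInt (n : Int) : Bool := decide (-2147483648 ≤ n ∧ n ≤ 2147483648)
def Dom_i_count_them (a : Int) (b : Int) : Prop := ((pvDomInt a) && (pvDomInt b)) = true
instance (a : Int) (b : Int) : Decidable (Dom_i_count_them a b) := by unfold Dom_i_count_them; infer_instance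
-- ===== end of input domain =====

-- B replaces A's while-loop + accumulator by direct self-recursion on (b, a % b); equivalence of return values on b ≠ 0.

-- termination helper (cited by both ports' decreasing_by)
theorem pv_mod_natAbs_lt (a b : Int) (hb : b ≠ 0) :
    (PySem.Int.mod a b).natAbs < b.natAbs := by
  rcases lt_or_gt_of_ne hb with h | h
  · have := PySem.Int.mod_neg_bounds a h
    omega
  · have h1 := PySem.Int.mod_nonneg a h
    have h2 := PySem.Int.mod_lt a h
    omega

-- ===== PORT A =====
-- the while-True loop of A, carrying the accumulator `count`; the b = 0 guard is
-- only to make it total (Python raises ZeroDivisionError there, excluded by Pre_)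
def pvLoopA (a b count : Int) : Int :=
  if hb : b = 0 then count
  else
    let count' := count + PySem.Int.floordiv a b
    let r := PySem.Int.mod a b
    if r = 0 then count' else pvLoopA b r count'
termination_by b.natAbs
decreasing_by exact pv_mod_natAbs_lt a b hb

def i_count_them (a : Int) (b : Int) : Int := pvLoopA a b 0

-- ===== PORT B =====
def i_count_them_alt (a : Int) (b : Int) : Int :=
  if hb : b = 0 then 0  -- totality guard; Python raises here, excluded by Pre_
  else
    let q := PySem.Int.floordiv a b
    let r := PySem.Int.mod a b
    if r = 0 then q else q + i_count_them_alt b r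
termination_by b.natAbs
decreasing_by exact pv_mod_natAbs_lt a b hb

-- ===== PRECONDITION & SPEC =====
-- Pre_ excludes exactly b = 0, where both Pythons raise ZeroDivisionError.
def Pre_i_count_them (a : Int) (b : Int) : Prop := b ≠ 0
instance (a : Int) (b : Int) : Decidable (Pre_i_count_them a b) := by unfold Pre_i_count_them; infer_instance
def pvWitness_i_count_them : Int × Int := (10, 3)

def Spec_i_count_them (a : Int) (b : Int) (out : Int) : Prop := out = i_count_them_alt a b
instance (a : Int) (b : Int) (out : Int) : Decidable (Spec_i_count_them a b out) := by unfold Spec_i_count_them; infer_instance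

-- ===== CLAIM (what is proved, stated in full; the proofs are below) =====
def Claim_equal_i_count_them : Prop := ∀ (a : Int) (b : Int), Dom_i_count_them a b → Pre_i_count_them a b → Spec_i_count_them a b (i_count_them a b)

-- ===== LEMMAS AND PROOFS =====

theorem pv_loop_eq_alt (n : Nat) : ∀ (a b c : Int), b.natAbs = n → b ≠ 0 →
    pvLoopA a b c = c + i_count_them_alt a b := by
  induction n using Nat.strong_induction_on with
  | _ n ih =>
    intro a b c hn hb
    rw [pvLoopA, i_count_them_alt]
    simp only [hb, dif_neg, not_false_iff]
    by_cases hr : PySem.Int.mod a b = 0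
    · simp [hr]
    · simp only [hr, if_neg, not_false_iff]
      rw [ih (PySem.Int.mod a b).natAbs (hn ▸ pv_mod_natAbs_lt a b hb)
            b (PySem.Int.mod a b) (c + PySem.Int.floordiv a b) rfl hr]
      ring

-- ===== VERDICT (by name: the statement is the Claim_ definition above) =====
theorem i_count_them_spec : Claim_equal_i_count_them := by
  intro a b _ hb
  unfold Spec_i_count_them i_count_them
  rw [pv_loop_eq_alt b.natAbs a b 0 rfl hb]
  ring
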